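-- pv_equiv track=rewrite | github.com/tm243/agent-assembly-line | agent_assembly_line/micros/text_cleanup_evaluator.py | _create_line_comparison_with_context
-- ===== SOURCE A (Python) =====
-- def _create_line_comparison_with_context(all_lines, line_info):
--     """
--     Create a detailed comparison showing original and corrected text blocks.
--
--     Args:
--         all_lines (list): All lines from the hunk (context, removals, additions)
--         line_info (dict): Line number information
--
--     Returns:
--         str: Formatted comparison with original and corrected blocks
--     """
--     if not all_lines:
--         return "No changes detected"
--
--     start_line = line_info.get('original_start', 1)
--     line_count = line_info.get('original_count', 1)
--     end_line = start_line + line_count - 1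
--
--     context_before = []
--     context_after = []
--     original_lines = []
--     corrected_lines = []
--
--     # Parse all lines and categorize them
--     for i, line in enumerate(all_lines):
--         line_content = line[1:] if len(line) > 0 else ""
--
--         if line.startswith(' '):  # Context line
--             # Determine if this context is before or after changes
--             has_changes_after = any(l.startswith(('-', '+')) and not l.startswith(('---', '+++'))
--                                   for l in all_lines[i+1:])
--             if has_changes_after:
--                 context_before.append(line_content.rstrip())
--             else:
--                 context_after.append(line_content.rstrip())
--         elif line.startswith('-') and not line.startswith('---'):
--             original_lines.append(line_content.rstrip())
--         elif line.startswith('+') and not line.startswith('+++'):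
--             corrected_lines.append(line_content.rstrip())
--
--     comparison_parts = []
--
--     # Header with line range
--     if end_line == start_line:
--         comparison_parts.append(f"Line {start_line}:")
--     else:
--         comparison_parts.append(f"Lines {start_line}-{end_line}:")
--
--     # Separator
--     comparison_parts.append("-" * 60)
--
--     # Original text block (context before + original + context after)
--     if context_before or original_lines or context_after:
--         # Add context before without prefix
--         comparison_parts.extend(context_before)
--         # Add original lines with "- " prefix
--         for line in original_lines:
--             comparison_parts.append("- " + line)
--         # Add context after without prefix
--         comparison_parts.extend(context_after)
--     else:
--         comparison_parts.append("(no original content)")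
--
--     # Separator
--     comparison_parts.append("-" * 60)
--
--     # Corrected text block (context before + corrected + context after)
--     if context_before or corrected_lines or context_after:
--         # Add context before without prefix
--         comparison_parts.extend(context_before)
--         # Add corrected lines with "+ " prefix
--         for line in corrected_lines:
--             comparison_parts.append("+ " + line)
--         # Add context after without prefix
--         comparison_parts.extend(context_after)
--     else:
--         comparison_parts.append("(no corrected content)")
--
--     # Final separator
--     comparison_parts.append("-" * 60)
--     comparison_parts.append("")  # Extra newline for spacing
--     comparison_parts.append("")  # Second newline for clear separation
--
--     return "\n".join(comparison_parts)
-- ===== SOURCE B (Python) =====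
-- def _create_line_comparison_with_context(all_lines, line_info):
--     """Single forward pass with a pending context buffer instead of a
--     per-context-line suffix scan; blocks are rendered by a shared helper."""
--     if not all_lines:
--         return "No changes detected"
--
--     start_line = line_info.get('original_start', 1)
--     end_line = start_line + line_info.get('original_count', 1) - 1
--
--     pending = []           # context lines not yet known to precede a change
--     context_before = []
--     original_lines = []
--     corrected_lines = []
--     for line in all_lines:
--         if line.startswith(' '):
--             pending.append(line[1:].rstrip())
--         elif line.startswith('-') and not line.startswith('---'):
--             context_before.extend(pending)
--             pending = []
--             original_lines.append(line[1:].rstrip())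
--         elif line.startswith('+') and not line.startswith('+++'):
--             context_before.extend(pending)
--             pending = []
--             corrected_lines.append(line[1:].rstrip())
--     context_after = pending
--
--     def block(mid, placeholder):
--         lines = context_before + mid + context_after
--         return lines if lines else [placeholder]
--
--     header = (f"Line {start_line}:" if end_line == start_line
--               else f"Lines {start_line}-{end_line}:")
--     sep = "-" * 60
--     parts = ([header, sep]
--              + block(["- " + l for l in original_lines], "(no original content)")
--              + [sep]
--              + block(["+ " + l for l in corrected_lines], "(no corrected content)")
--              + [sep, "", ""])
--     return "\n".join(parts)
-- ===== Notes on version B (the rewrite author's own statement) =====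
-- stated objective: alternative
-- what changed: B replaces A's per-context-line suffix scan (any() over all_lines[i+1:] for every context line) with a single forward pass that keeps a pending context buffer, flushed into context_before whenever a real change line appears; the leftover buffer becomes context_after, and the output blocks are rendered by a shared helper.
import Mathlib
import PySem

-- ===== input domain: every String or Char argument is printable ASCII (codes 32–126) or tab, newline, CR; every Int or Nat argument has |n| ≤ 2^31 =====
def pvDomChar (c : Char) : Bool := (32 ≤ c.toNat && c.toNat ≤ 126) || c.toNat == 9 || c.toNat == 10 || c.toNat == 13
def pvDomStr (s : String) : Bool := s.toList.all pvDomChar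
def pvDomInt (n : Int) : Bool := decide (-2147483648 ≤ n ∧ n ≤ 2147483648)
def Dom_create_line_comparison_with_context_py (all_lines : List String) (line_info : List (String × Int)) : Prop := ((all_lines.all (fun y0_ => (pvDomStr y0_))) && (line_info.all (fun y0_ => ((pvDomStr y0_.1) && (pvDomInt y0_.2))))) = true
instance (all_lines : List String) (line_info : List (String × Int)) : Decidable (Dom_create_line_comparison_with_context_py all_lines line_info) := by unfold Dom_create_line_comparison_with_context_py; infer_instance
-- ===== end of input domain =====

-- B replaces A's per-context-line suffix scan by a single forward pass with a
-- pending context buffer; same return value (no argument is mutated).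

-- ===== PORT A =====

def pvSep : String := String.ofList (List.replicate 60 '-')

-- step of A's categorizing loop: state (context_before, context_after, original, corrected)
def pvAStep (all_lines : List String)
    (st : List String × List String × List String × List String) (p : Int × String) :
    List String × List String × List String × List String :=
  let (cb, ca, ol, cl) := st
  let line := p.2
  let line_content := if PySem.Str.len line > 0 then PySem.Str.slice line (some 1) none else ""
  if PySem.Str.startswith line " " then
    if (PySem.List.slice all_lines (some (p.1 + 1)) none).any
        (fun l => (PySem.Str.startswith l "-" || PySem.Str.startswith l "+") &&
                  !(PySem.Str.startswith l "---" || PySem.Str.startswith l "+++")) then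
      (cb ++ [PySem.Str.rstrip line_content], ca, ol, cl)
    else
      (cb, ca ++ [PySem.Str.rstrip line_content], ol, cl)
  else if PySem.Str.startswith line "-" && !PySem.Str.startswith line "---" then
    (cb, ca, ol ++ [PySem.Str.rstrip line_content], cl)
  else if PySem.Str.startswith line "+" && !PySem.Str.startswith line "+++" then
    (cb, ca, ol, cl ++ [PySem.Str.rstrip line_content])
  else
    (cb, ca, ol, cl)

def create_line_comparison_with_context_py (all_lines : List String) (line_info : List (String × Int)) : String :=
  if all_lines.isEmpty then "No changes detected" else
  let start_line := PySem.Dict.getD ⟨line_info⟩ "original_start" 1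
  let line_count := PySem.Dict.getD ⟨line_info⟩ "original_count" 1
  let end_line := start_line + line_count - 1
  let (context_before, context_after, original_lines, corrected_lines) :=
    (PySem.List.enumerate all_lines).foldl (pvAStep all_lines) ([], [], [], [])
  let parts : List String :=
    [if end_line == start_line then "Line " ++ PySem.Int.toStr start_line ++ ":"
     else "Lines " ++ PySem.Int.toStr start_line ++ "-" ++ PySem.Int.toStr end_line ++ ":"]
  let parts := parts ++ [pvSep]
  let parts :=
    if !context_before.isEmpty || !original_lines.isEmpty || !context_after.isEmpty then
      parts ++ context_before ++ original_lines.map (fun l => "- " ++ l) ++ context_after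
    else parts ++ ["(no original content)"]
  let parts := parts ++ [pvSep]
  let parts :=
    if !context_before.isEmpty || !corrected_lines.isEmpty || !context_after.isEmpty then
      parts ++ context_before ++ corrected_lines.map (fun l => "+ " ++ l) ++ context_after
    else parts ++ ["(no corrected content)"]
  let parts := parts ++ [pvSep] ++ [""] ++ [""]
  PySem.Str.join "\n" parts

-- ===== PORT B =====

-- step of B's single pass: state (pending, context_before, original, corrected)
def pvBStep (st : List String × List String × List String × List String) (line : String) :
    List String × List String × List String × List String :=
  let (pending, cb, ol, cl) := st
  if PySem.Str.startswith line " " then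
    (pending ++ [PySem.Str.rstrip (PySem.Str.slice line (some 1) none)], cb, ol, cl)
  else if PySem.Str.startswith line "-" && !PySem.Str.startswith line "---" then
    ([], cb ++ pending, ol ++ [PySem.Str.rstrip (PySem.Str.slice line (some 1) none)], cl)
  else if PySem.Str.startswith line "+" && !PySem.Str.startswith line "+++" then
    ([], cb ++ pending, ol, cl ++ [PySem.Str.rstrip (PySem.Str.slice line (some 1) none)])
  else st

def pvBlock (context_before context_after mid : List String) (placeholder : String) : List String :=
  let lines := context_before ++ mid ++ context_after
  if lines.isEmpty then [placeholder] else lines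

def create_line_comparison_with_context_py_alt (all_lines : List String) (line_info : List (String × Int)) : String :=
  if all_lines.isEmpty then "No changes detected" else
  let start_line := PySem.Dict.getD ⟨line_info⟩ "original_start" 1
  let end_line := start_line + PySem.Dict.getD ⟨line_info⟩ "original_count" 1 - 1
  let (pending, context_before, original_lines, corrected_lines) :=
    all_lines.foldl pvBStep ([], [], [], [])
  let header :=
    if end_line == start_line then "Line " ++ PySem.Int.toStr start_line ++ ":"
    else "Lines " ++ PySem.Int.toStr start_line ++ "-" ++ PySem.Int.toStr end_line ++ ":"
  PySem.Str.join "\n"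
    ([header, pvSep]
      ++ pvBlock context_before pending (original_lines.map (fun l => "- " ++ l)) "(no original content)"
      ++ [pvSep]
      ++ pvBlock context_before pending (corrected_lines.map (fun l => "+ " ++ l)) "(no corrected content)"
      ++ [pvSep, "", ""])

-- ===== PRECONDITION & SPEC =====
def Spec_create_line_comparison_with_context_py (all_lines : List String) (line_info : List (String × Int)) (out : String) : Prop := out = create_line_comparison_with_context_py_alt all_lines line_info
instance (all_lines : List String) (line_info : List (String × Int)) (out : String) : Decidable (Spec_create_line_comparison_with_context_py all_lines line_info out) := by unfold Spec_create_line_comparison_with_context_py; infer_instance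

-- ===== CLAIM (what is proved, stated in full; the proofs are below) =====
def Claim_equal_create_line_comparison_with_context_py : Prop := ∀ (all_lines : List String) (line_info : List (String × Int)), Dom_create_line_comparison_with_context_py all_lines line_info → Spec_create_line_comparison_with_context_py all_lines line_info (create_line_comparison_with_context_py all_lines line_info)

-- ===== LEMMAS AND PROOFS =====

def pvIsChange (l : String) : Bool :=
  (PySem.Str.startswith l "-" || PySem.Str.startswith l "+") &&
  !(PySem.Str.startswith l "---" || PySem.Str.startswith l "+++")

-- structural restatement of A's categorizer (the tail plays the role of all_lines[i+1:])
def pvCatA : List String → List String × List String × List String × List String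
  | [] => ([], [], [], [])
  | line :: rest =>
    let (cb, ca, ol, cl) := pvCatA rest
    let c := PySem.Str.rstrip (PySem.Str.slice line (some 1) none)
    if PySem.Str.startswith line " " then
      if rest.any pvIsChange then (c :: cb, ca, ol, cl) else (cb, c :: ca, ol, cl)
    else if PySem.Str.startswith line "-" && !PySem.Str.startswith line "---" then
      (cb, ca, c :: ol, cl)
    else if PySem.Str.startswith line "+" && !PySem.Str.startswith line "+++" then
      (cb, ca, ol, c :: cl)
    else (cb, ca, ol, cl)

theorem pvSwHead (l p : String) (c : Char) (hc : p.toList.head? = some c)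
    (h : PySem.Str.startswith l p = true) : l.toList.head? = some c := by
  have h' : p.toList <+: l.toList := (PySem.Chars.startswith_iff _ _).mp (by simpa using h)
  obtain ⟨t, ht⟩ := h'
  cases hp : p.toList with
  | nil => simp [hp] at hc
  | cons a as =>
    rw [hp] at hc ht
    simp at hc
    subst hc
    rw [← ht]
    simp

theorem pvContent_eq (line : String) :
    (if PySem.Str.len line > 0 then PySem.Str.slice line (some 1) none else "")
      = PySem.Str.slice line (some 1) none := by
  split
  · rfl
  · rename_i h
    have hlen : line.toList.length = 0 := by
      simp [PySem.Str.len] at h ⊢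
      omega
    have hl : line = "" := String.toList_eq_nil_iff.mp (List.length_eq_zero_iff.mp hlen)
    subst hl
    decide

theorem pvNotChange_of_space (l : String) (h : PySem.Str.startswith l " " = true) :
    pvIsChange l = false := by
  have hh := pvSwHead l " " ' ' (by decide) h
  have h1 : PySem.Str.startswith l "-" = false := by
    cases hm : PySem.Str.startswith l "-" with
    | false => rfl
    | true => have := pvSwHead l "-" '-' (by decide) hm; rw [hh] at this; simp at this
  have h2 : PySem.Str.startswith l "+" = false := by
    cases hm : PySem.Str.startswith l "+" with
    | false => rfl
    | true => have := pvSwHead l "+" '+' (by decide) hm; rw [hh] at this; simp at this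
  unfold pvIsChange
  rw [h1, h2]
  simp

theorem pvChange_of_minus (l : String) (h : PySem.Str.startswith l "-" = true)
    (h3 : PySem.Str.startswith l "---" = false) : pvIsChange l = true := by
  have hh := pvSwHead l "-" '-' (by decide) h
  have hp : PySem.Str.startswith l "+++" = false := by
    cases hm : PySem.Str.startswith l "+++" with
    | false => rfl
    | true => have := pvSwHead l "+++" '+' (by decide) hm; rw [hh] at this; simp at this
  unfold pvIsChange
  rw [h, h3, hp]
  simp

theorem pvChange_of_plus (l : String) (h : PySem.Str.startswith l "+" = true)
    (h3 : PySem.Str.startswith l "+++" = false) : pvIsChange l = true := by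
  have hh := pvSwHead l "+" '+' (by decide) h
  have hp : PySem.Str.startswith l "---" = false := by
    cases hm : PySem.Str.startswith l "---" with
    | false => rfl
    | true => have := pvSwHead l "---" '-' (by decide) hm; rw [hh] at this; simp at this
  unfold pvIsChange
  rw [h, h3, hp]
  simp

theorem pvNotChange_other (l : String)
    (h1 : (PySem.Str.startswith l "-" && !PySem.Str.startswith l "---") = false)
    (h2 : (PySem.Str.startswith l "+" && !PySem.Str.startswith l "+++") = false) :
    pvIsChange l = false := by
  unfold pvIsChange
  revert h1 h2
  cases hA : PySem.Str.startswith l "-" <;> cases hB : PySem.Str.startswith l "+" <;>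
    cases hC : PySem.Str.startswith l "---" <;> cases hD : PySem.Str.startswith l "+++" <;>
      decide

-- A's indexed fold over enumerate equals the structural categorizer
theorem pvAfold (full : List String) :
    ∀ (l : List String) (k : Nat), full.drop k = l →
    ∀ cb ca ol cl : List String,
      (PySem.List.enumerate l (k : Int)).foldl (pvAStep full) (cb, ca, ol, cl) =
        ((cb ++ (pvCatA l).1, ca ++ (pvCatA l).2.1, ol ++ (pvCatA l).2.2.1, cl ++ (pvCatA l).2.2.2)) := by
  intro l
  induction l with
  | nil => intro k hk cb ca ol cl; simp [PySem.List.enumerate, pvCatA]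
  | cons x rest ih =>
    intro k hk cb ca ol cl
    have hrest : full.drop (k + 1) = rest := by
      rw [← List.tail_drop, hk]
      rfl
    rw [PySem.List.enumerate_cons, List.foldl_cons,
      show ((k : Int) + 1) = ((k + 1 : Nat) : Int) by push_cast; ring]
    have hslice : PySem.List.slice full (some ((k + 1 : Nat) : Int)) none = rest := by
      rw [PySem.List.slice_from_natCast, hrest]
    have hstep : pvAStep full (cb, ca, ol, cl) ((k : Int), x) =
        (let c := PySem.Str.rstrip (PySem.Str.slice x (some 1) none)
         if PySem.Str.startswith x " " then
           if rest.any pvIsChange then (cb ++ [c], ca, ol, cl) else (cb, ca ++ [c], ol, cl)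
         else if PySem.Str.startswith x "-" && !PySem.Str.startswith x "---" then
           (cb, ca, ol ++ [c], cl)
         else if PySem.Str.startswith x "+" && !PySem.Str.startswith x "+++" then
           (cb, ca, ol, cl ++ [c])
         else (cb, ca, ol, cl)) := by
      simp only [pvAStep, pvContent_eq]
      rw [show ((k : Int) + 1) = ((k + 1 : Nat) : Int) by push_cast; ring, hslice]
      rfl
    rcases h : pvCatA rest with ⟨a, b, c, d⟩
    have hIH := ih (k+1) hrest
    rw [h] at hIH
    set cnt := PySem.Str.rstrip (PySem.Str.slice x (some 1) none) with hcnt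
    by_cases hsp : PySem.Str.startswith x " " = true
    · by_cases hch : rest.any pvIsChange = true
      · have hx : pvCatA (x :: rest) = (cnt :: a, b, c, d) := by
          simp only [pvCatA, h]; rw [if_pos hsp, if_pos hch]
        rw [hstep, hx]
        simp only [if_pos hsp, if_pos hch]
        rw [hIH]
        simp
      · have hx : pvCatA (x :: rest) = (a, cnt :: b, c, d) := by
          simp only [pvCatA, h]; rw [if_pos hsp, if_neg hch]
        rw [hstep, hx]
        simp only [if_pos hsp, if_neg hch]
        rw [hIH]
        simp
    · by_cases hm : (PySem.Str.startswith x "-" && !PySem.Str.startswith x "---") = true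
      · have hx : pvCatA (x :: rest) = (a, b, cnt :: c, d) := by
          simp only [pvCatA, h]; rw [if_neg hsp, if_pos hm]
        rw [hstep, hx]
        simp only [if_neg hsp, if_pos hm]
        rw [hIH]
        simp
      · by_cases hp : (PySem.Str.startswith x "+" && !PySem.Str.startswith x "+++") = true
        · have hx : pvCatA (x :: rest) = (a, b, c, cnt :: d) := by
            simp only [pvCatA, h]; rw [if_neg hsp, if_neg hm, if_pos hp]
          rw [hstep, hx]
          simp only [if_neg hsp, if_neg hm, if_pos hp]
          rw [hIH]
          simp
        · have hx : pvCatA (x :: rest) = (a, b, c, d) := by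
            simp only [pvCatA, h]; rw [if_neg hsp, if_neg hm, if_neg hp]
          rw [hstep, hx]
          simp only [if_neg hsp, if_neg hm, if_neg hp]
          rw [hIH]

-- if no change line exists, the categorizer puts everything into context_after
theorem pvCatA_nochange (l : List String) (h : l.any pvIsChange = false) :
    (pvCatA l).1 = [] ∧ (pvCatA l).2.2.1 = [] ∧ (pvCatA l).2.2.2 = [] := by
  induction l with
  | nil => simp [pvCatA]
  | cons x rest ih =>
    simp only [List.any_cons, Bool.or_eq_false_iff] at h
    obtain ⟨hx, hrest⟩ := h
    obtain ⟨h1, h2, h3⟩ := ih hrest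
    rcases hc : pvCatA rest with ⟨a, b, c, d⟩
    rw [hc] at h1 h2 h3
    simp only at h1 h2 h3
    subst h1 h2 h3
    simp only [pvCatA, hc]
    by_cases hsp : PySem.Str.startswith x " " = true
    · rw [if_pos hsp, if_neg (by rw [hrest]; simp)]
      simp
    · by_cases hm : (PySem.Str.startswith x "-" && !PySem.Str.startswith x "---") = true
      · exfalso
        simp only [Bool.and_eq_true, Bool.not_eq_true'] at hm
        rw [pvChange_of_minus x hm.1 hm.2] at hx
        exact absurd hx (by decide)
      · by_cases hp : (PySem.Str.startswith x "+" && !PySem.Str.startswith x "+++") = true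
        · exfalso
          simp only [Bool.and_eq_true, Bool.not_eq_true'] at hp
          rw [pvChange_of_plus x hp.1 hp.2] at hx
          exact absurd hx (by decide)
        · rw [if_neg hsp, if_neg hm, if_neg hp]
          simp

-- B's single pass with pending buffer, related to the structural categorizer
theorem pvBfold :
    ∀ (l : List String) (p cb ol cl : List String),
      l.foldl pvBStep (p, cb, ol, cl) =
        (if l.any pvIsChange then
          ((pvCatA l).2.1, cb ++ p ++ (pvCatA l).1, ol ++ (pvCatA l).2.2.1, cl ++ (pvCatA l).2.2.2)
         else (p ++ (pvCatA l).2.1, cb, ol, cl)) := by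
  intro l
  induction l with
  | nil => intro p cb ol cl; simp [pvCatA]
  | cons x rest ih =>
    intro p cb ol cl
    rw [List.foldl_cons]
    rcases h : pvCatA rest with ⟨a, b, c, d⟩
    set cnt := PySem.Str.rstrip (PySem.Str.slice x (some 1) none) with hcnt
    by_cases hsp : PySem.Str.startswith x " " = true
    · have hnc := pvNotChange_of_space x hsp
      have hbs : pvBStep (p, cb, ol, cl) x = (p ++ [cnt], cb, ol, cl) := by
        simp only [pvBStep]; rw [if_pos hsp]
      by_cases hch : rest.any pvIsChange = true
      · have hx : pvCatA (x :: rest) = (cnt :: a, b, c, d) := by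
          simp only [pvCatA, h]; rw [if_pos hsp, if_pos hch]
        rw [hbs, ih, hx]
        simp [h, hnc, hch]
      · have hx : pvCatA (x :: rest) = (a, cnt :: b, c, d) := by
          simp only [pvCatA, h]; rw [if_pos hsp, if_neg hch]
        rw [hbs, ih, hx]
        simp [h, hnc, hch]
    · by_cases hm : (PySem.Str.startswith x "-" && !PySem.Str.startswith x "---") = true
      · have hc : pvIsChange x = true := by
          simp only [Bool.and_eq_true, Bool.not_eq_true'] at hm
          exact pvChange_of_minus x hm.1 hm.2
        have hbs : pvBStep (p, cb, ol, cl) x = ([], cb ++ p, ol ++ [cnt], cl) := by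
          simp only [pvBStep]; rw [if_neg hsp, if_pos hm]
        by_cases hch : rest.any pvIsChange = true
        · have hx : pvCatA (x :: rest) = (a, b, cnt :: c, d) := by
            simp only [pvCatA, h]; rw [if_neg hsp, if_pos hm]
          rw [hbs, ih, hx]
          simp [h, hc, hch]
        · have hx : pvCatA (x :: rest) = (a, b, cnt :: c, d) := by
            simp only [pvCatA, h]; rw [if_neg hsp, if_pos hm]
          obtain ⟨h1, h2, h3⟩ := pvCatA_nochange rest (by simpa using hch)
          rw [h] at h1 h2 h3
          simp only at h1 h2 h3
          rw [hbs, ih, hx]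
          simp [h, hc, hch, h1, h2, h3]
      · by_cases hp : (PySem.Str.startswith x "+" && !PySem.Str.startswith x "+++") = true
        · have hc : pvIsChange x = true := by
            simp only [Bool.and_eq_true, Bool.not_eq_true'] at hp
            exact pvChange_of_plus x hp.1 hp.2
          have hbs : pvBStep (p, cb, ol, cl) x = ([], cb ++ p, ol, cl ++ [cnt]) := by
            simp only [pvBStep]; rw [if_neg hsp, if_neg hm, if_pos hp]
          by_cases hch : rest.any pvIsChange = true
          · have hx : pvCatA (x :: rest) = (a, b, c, cnt :: d) := by
              simp only [pvCatA, h]; rw [if_neg hsp, if_neg hm, if_pos hp]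
            rw [hbs, ih, hx]
            simp [h, hc, hch]
          · have hx : pvCatA (x :: rest) = (a, b, c, cnt :: d) := by
              simp only [pvCatA, h]; rw [if_neg hsp, if_neg hm, if_pos hp]
            obtain ⟨h1, h2, h3⟩ := pvCatA_nochange rest (by simpa using hch)
            rw [h] at h1 h2 h3
            simp only at h1 h2 h3
            rw [hbs, ih, hx]
            simp [h, hc, hch, h1, h2, h3]
        · have hc : pvIsChange x = false :=
            pvNotChange_other x (Bool.eq_false_iff.mpr hm) (Bool.eq_false_iff.mpr hp)
          have hbs : pvBStep (p, cb, ol, cl) x = (p, cb, ol, cl) := by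
            simp only [pvBStep]; rw [if_neg hsp, if_neg hm, if_neg hp]
          have hx : pvCatA (x :: rest) = (a, b, c, d) := by
            simp only [pvCatA, h]; rw [if_neg hsp, if_neg hm, if_neg hp]
          rw [hbs, ih, hx]
          simp [h, hc]

-- both folds produce the same four lists
theorem pvFolds_eq (all_lines : List String) :
    all_lines.foldl pvBStep ([], [], [], []) =
      (let r := (PySem.List.enumerate all_lines).foldl (pvAStep all_lines) ([], [], [], [])
       (r.2.1, r.1, r.2.2.1, r.2.2.2)) := by
  have ha := pvAfold all_lines all_lines 0 (by simp) [] [] [] []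
  have : PySem.List.enumerate all_lines ((0 : Nat) : Int) = PySem.List.enumerate all_lines 0 := by norm_num
  rw [this] at ha
  rw [ha, pvBfold all_lines [] [] [] []]
  by_cases hch : all_lines.any pvIsChange = true
  · simp [hch]
  · obtain ⟨h1, h2, h3⟩ := pvCatA_nochange all_lines (by simpa using hch)
    simp [hch, h1, h2, h3]

-- the two renderings of a block agree
theorem pvBlock_eq (cb ca mid : List String) (midSrc : List String) (f : String → String)
    (hmid : mid = midSrc.map f) (ph : String) (pre : List String) :
    (if !cb.isEmpty || !midSrc.isEmpty || !ca.isEmpty then pre ++ cb ++ mid ++ ca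
     else pre ++ [ph]) = pre ++ pvBlock cb ca mid ph := by
  unfold pvBlock
  subst hmid
  by_cases h : cb = [] ∧ midSrc = [] ∧ ca = []
  · obtain ⟨h1, h2, h3⟩ := h
    subst h1 h2 h3
    simp
  · have hne : (cb ++ midSrc.map f ++ ca).isEmpty = false := by
      rcases List.eq_nil_or_concat cb with h1 | _
      · rcases List.eq_nil_or_concat midSrc with h2 | _
        · rcases List.eq_nil_or_concat ca with h3 | _
          · exact absurd ⟨h1, h2, h3⟩ h
          · simp_all
        · simp_all
      · simp_all
    have hcond : (!cb.isEmpty || !(midSrc.isEmpty) || !ca.isEmpty) = true := by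
      rcases cb with _ | ⟨y, ys⟩
      · rcases midSrc with _ | ⟨z, zs⟩
        · rcases ca with _ | ⟨w, ws⟩
          · exact absurd ⟨rfl, rfl, rfl⟩ h
          · simp
        · simp
      · simp
    rw [hcond]
    simp only [if_pos]
    rw [if_neg (by simp_all)]
    simp

-- ===== VERDICT (by name: the statement is the Claim_ definition above) =====
theorem create_line_comparison_with_context_py_spec : Claim_equal_create_line_comparison_with_context_py := by
  intro all_lines line_info _
  unfold Spec_create_line_comparison_with_context_py
  unfold create_line_comparison_with_context_py create_line_comparison_with_context_py_alt
  by_cases he : all_lines.isEmpty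
  · simp [he]
  · simp only [he, if_neg, Bool.false_eq_true, not_false_iff]
    rw [pvFolds_eq all_lines]
    rcases hr : (PySem.List.enumerate all_lines).foldl (pvAStep all_lines) ([], [], [], [])
      with ⟨cb, ca, ol, cl⟩
    simp only
    congr 1
    rw [← pvBlock_eq cb ca (ol.map (fun l => "- " ++ l)) ol (fun l => "- " ++ l) rfl
          "(no original content)"]
    rw [← pvBlock_eq cb ca (cl.map (fun l => "+ " ++ l)) cl (fun l => "+ " ++ l) rfl
          "(no corrected content)"]
    by_cases h1 : (!cb.isEmpty || !ol.isEmpty || !ca.isEmpty) = true <;>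
      by_cases h2 : (!cb.isEmpty || !cl.isEmpty || !ca.isEmpty) = true <;>
        simp [h1, h2]
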